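-- pv_equiv track=rewrite | github.com/tzookb/programming-challenges | exercises/leetcode/remove-invalid-parentheses/sol.py | getRemovals
-- ===== SOURCE A (Python) =====
-- def getRemovals(s: str) -> int:
--     removalsClosurs = 0
--     removalsOpeners = 0
--     openers = 0
--     cleanedFromClosers = []
--     for c in s:
--         if c == "(":
--             openers += 1
--         elif c == ")":
--             if openers > 0:
--                 openers -= 1
--             else:
--                 removalsClosurs += 1
--                 continue
--         cleanedFromClosers.append(c)
--
--     cleanedFromClosers.reverse()
--     closers = 0
--
--     for c in cleanedFromClosers:
--         if c == ")":
--             closers += 1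
--         elif c == "(":
--             if closers > 0:
--                 closers -= 1
--             else:
--                 removalsOpeners += 1
--                 continue
--     return (removalsOpeners, removalsClosurs)
-- ===== SOURCE B (Python) =====
-- def getRemovals(s: str) -> int:
--     balance = 0          # unmatched openers so far
--     invalid_closers = 0  # closers with no opener to match
--     for c in s:
--         if c == "(":
--             balance += 1
--         elif c == ")":
--             if balance > 0:
--                 balance -= 1
--             else:
--                 invalid_closers += 1
--     return (balance, invalid_closers)
-- ===== Notes on version B (the rewrite author's own statement) =====
-- stated objective: simpler
-- what changed: Replaced A's two passes (build a cleaned list, reverse it, rescan it) by one pass keeping only an open-balance and an invalid-closer counter; the final balance is the unmatched-opener count A recomputes on the reversed cleaned list.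
import Mathlib
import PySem

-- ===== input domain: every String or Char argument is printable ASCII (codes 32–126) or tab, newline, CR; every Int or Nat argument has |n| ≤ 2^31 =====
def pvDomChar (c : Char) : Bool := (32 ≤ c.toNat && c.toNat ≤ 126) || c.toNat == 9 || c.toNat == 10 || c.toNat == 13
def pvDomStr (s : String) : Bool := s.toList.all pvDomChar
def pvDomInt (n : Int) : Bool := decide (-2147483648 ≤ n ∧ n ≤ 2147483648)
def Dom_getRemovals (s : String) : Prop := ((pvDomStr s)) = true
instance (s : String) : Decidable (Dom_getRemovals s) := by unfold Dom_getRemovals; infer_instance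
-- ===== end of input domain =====

-- B: one pass with an open-balance and an invalid-closer counter, instead of A's
-- two passes over a cleaned-then-reversed list (simpler; same return value).


-- ===== PORT A =====
-- first loop: state (removalsClosurs, openers, cleanedFromClosers)
def getRemovalsLoop1 : List Char → Int → Int → List Char → Int × Int × List Char
  | [], rc, op, cleaned => (rc, op, cleaned)
  | c :: rest, rc, op, cleaned =>
    if c = '(' then getRemovalsLoop1 rest rc (op + 1) (cleaned ++ [c])
    else if c = ')' then
      if op > 0 then getRemovalsLoop1 rest rc (op - 1) (cleaned ++ [c])
      else getRemovalsLoop1 rest (rc + 1) op cleaned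
    else getRemovalsLoop1 rest rc op (cleaned ++ [c])

-- second loop: state (closers, removalsOpeners)
def getRemovalsLoop2 : List Char → Int → Int → Int × Int
  | [], closers, ro => (closers, ro)
  | c :: rest, closers, ro =>
    if c = ')' then getRemovalsLoop2 rest (closers + 1) ro
    else if c = '(' then
      if closers > 0 then getRemovalsLoop2 rest (closers - 1) ro
      else getRemovalsLoop2 rest closers (ro + 1)
    else getRemovalsLoop2 rest closers ro

def getRemovals (s : String) : Int × Int :=
  let r1 := getRemovalsLoop1 s.toList 0 0 []
  let r2 := getRemovalsLoop2 r1.2.2.reverse 0 0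
  (r2.2, r1.1)

-- ===== PORT B =====
-- one pass: state (balance, invalid_closers)
def getRemovalsAltLoop : List Char → Int → Int → Int × Int
  | [], bal, inv => (bal, inv)
  | c :: rest, bal, inv =>
    if c = '(' then getRemovalsAltLoop rest (bal + 1) inv
    else if c = ')' then
      if bal > 0 then getRemovalsAltLoop rest (bal - 1) inv
      else getRemovalsAltLoop rest bal (inv + 1)
    else getRemovalsAltLoop rest bal inv

def getRemovals_alt (s : String) : Int × Int := getRemovalsAltLoop s.toList 0 0

-- ===== PRECONDITION & SPEC =====
def Spec_getRemovals (s : String) (out : Int × Int) : Prop := out = getRemovals_alt s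
instance (s : String) (out : Int × Int) : Decidable (Spec_getRemovals s out) := by unfold Spec_getRemovals; infer_instance

-- ===== CLAIM (what is proved, stated in full; the proofs are below) =====
def Claim_equal_getRemovals : Prop := ∀ (s : String), Dom_getRemovals s → Spec_getRemovals s (getRemovals s)

-- ===== LEMMAS AND PROOFS =====

-- M r = max over prefixes p of r of (#'(' p - #')' p); always ≥ 0 (empty prefix).
def pvM : List Char → Int
  | [] => 0
  | c :: r => max 0 ((if c = '(' then 1 else if c = ')' then -1 else 0) + pvM r)

theorem pvM_nonneg : ∀ r : List Char, 0 ≤ pvM r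
  | [] => le_refl 0
  | _ :: r => le_max_left _ _

-- the second loop returns removalsOpeners = ro + max 0 (pvM r - closers)
theorem loop2_eq : ∀ (r : List Char) (c ro : Int), 0 ≤ c →
    (getRemovalsLoop2 r c ro).2 = ro + max 0 (pvM r - c) := by
  intro r
  induction r with
  | nil => intro c ro hc; simp [getRemovalsLoop2, pvM]; omega
  | cons x r ih =>
    intro c ro hc
    have hM := pvM_nonneg r
    by_cases hx : x = ')'
    · have h := ih (c + 1) ro (by omega)
      simp [getRemovalsLoop2, hx, pvM, h]; omega
    · by_cases ho : x = '('
      · by_cases hc0 : c > 0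
        · have h := ih (c - 1) ro (by omega)
          simp [getRemovalsLoop2, hx, ho, hc0, pvM, h]; omega
        · have h := ih c (ro + 1) hc
          simp [getRemovalsLoop2, hx, ho, hc0, pvM, h]; omega
      · have h := ih c ro hc
        simp [getRemovalsLoop2, hx, ho, pvM, h]
        omega

-- first-loop invariant: B's single pass computes (openers, removalsClosurs) of A's
-- first loop, and pvM of the reversed cleaned list equals the final openers count.
theorem loop1_inv : ∀ (l : List Char) (rc op : Int) (cleaned : List Char),
    0 ≤ op → pvM cleaned.reverse = op →
    getRemovalsAltLoop l op rc =
      ((getRemovalsLoop1 l rc op cleaned).2.1, (getRemovalsLoop1 l rc op cleaned).1) ∧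
    pvM (getRemovalsLoop1 l rc op cleaned).2.2.reverse = (getRemovalsLoop1 l rc op cleaned).2.1 ∧
    0 ≤ (getRemovalsLoop1 l rc op cleaned).2.1 := by
  intro l
  induction l with
  | nil =>
    intro rc op cleaned h0 hM
    exact ⟨rfl, hM, h0⟩
  | cons c rest ih =>
    intro rc op cleaned h0 hM
    by_cases ho : c = '('
    · have hM' : pvM (cleaned ++ [c]).reverse = op + 1 := by
        simp [ho, pvM, hM]; omega
      have := ih rc (op + 1) (cleaned ++ [c]) (by omega) hM'
      simpa [getRemovalsLoop1, getRemovalsAltLoop, ho] using this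
    · by_cases hc : c = ')'
      · by_cases hop : op > 0
        · have hM' : pvM (cleaned ++ [c]).reverse = op - 1 := by
            simp [hc, ho, pvM, hM]; omega
          have := ih rc (op - 1) (cleaned ++ [c]) (by omega) hM'
          simpa [getRemovalsLoop1, getRemovalsAltLoop, ho, hc, hop] using this
        · have := ih (rc + 1) op cleaned h0 hM
          simpa [getRemovalsLoop1, getRemovalsAltLoop, ho, hc, hop] using this
      · have hM' : pvM (cleaned ++ [c]).reverse = op := by
          simp [ho, hc, pvM, hM]
          exact h0
        have := ih rc op (cleaned ++ [c]) h0 hM'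
        simpa [getRemovalsLoop1, getRemovalsAltLoop, ho, hc] using this

-- ===== VERDICT (by name: the statement is the Claim_ definition above) =====
theorem getRemovals_spec : Claim_equal_getRemovals := by
  unfold Claim_equal_getRemovals
  intro s _
  unfold Spec_getRemovals getRemovals getRemovals_alt
  obtain ⟨h1, h2, h3⟩ := loop1_inv s.toList 0 0 [] (le_refl 0) rfl
  have h4 := loop2_eq (getRemovalsLoop1 s.toList 0 0 []).2.2.reverse 0 0 (le_refl 0)
  simp only [h1, h4, h2, Prod.mk.injEq]
  exact ⟨by omega, trivial⟩
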